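-- pv_equiv track=rewrite | github.com/themayabello/offeronly | backend/utils.py | structure_script
-- ===== SOURCE A (Python) =====
-- def structure_script(script_lines):
--     structured = []
--     current_character = None
--     additional_lines = []
--
--     for line in script_lines:
--         if line.isupper() and 1 <= len(line.split()) <= 4:
--             if current_character and additional_lines:
--                 structured.append({
--                     "character": current_character,
--                     "line": ' '.join(additional_lines).strip()
--                 })
--                 # reset buffer
--                 additional_lines = []
--             current_character = line
--         elif current_character:
--             if line.strip().startswith("(") and line.strip().endswith(")"):
--                 continue  # skip parenthetical
--             additional_lines.append(line)
--
--     # Catch the last line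
--     if current_character and additional_lines:
--         structured.append({
--             "character": current_character,
--             "line": ' '.join(additional_lines).strip()
--         })
--
--     # Return full script for now (you can filter later if needed)
--     return structured
-- ===== SOURCE B (Python) =====
-- def structure_script(script_lines):
--     # Two-phase block decomposition: skip the prologue, then repeatedly take the
--     # header and scan forward to the next header; filter/join each block at once.
--     def is_header(line):
--         return line.isupper() and 1 <= len(line.split()) <= 4
--
--     def is_paren(line):
--         s = line.strip()
--         return s.startswith("(") and s.endswith(")")
--
--     n = len(script_lines)
--     out = []
--     i = 0
--     while i < n and not is_header(script_lines[i]):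
--         i += 1
--     while i < n:
--         ch = script_lines[i]
--         j = i + 1
--         while j < n and not is_header(script_lines[j]):
--             j += 1
--         body = [l for l in script_lines[i + 1:j] if not is_paren(l)]
--         if body:
--             out.append({"character": ch, "line": " ".join(body).strip()})
--         i = j
--     return out
-- ===== Notes on version B (the rewrite author's own statement) =====
-- stated objective: alternative
-- what changed: Replaces A's single pass with three mutable accumulators (structured list, current character, dialogue buffer with a final flush) by a two-phase block decomposition: skip the prologue, then repeatedly take a header and scan forward to the next header, filtering/joining each block's slice at once.
import Mathlib
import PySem

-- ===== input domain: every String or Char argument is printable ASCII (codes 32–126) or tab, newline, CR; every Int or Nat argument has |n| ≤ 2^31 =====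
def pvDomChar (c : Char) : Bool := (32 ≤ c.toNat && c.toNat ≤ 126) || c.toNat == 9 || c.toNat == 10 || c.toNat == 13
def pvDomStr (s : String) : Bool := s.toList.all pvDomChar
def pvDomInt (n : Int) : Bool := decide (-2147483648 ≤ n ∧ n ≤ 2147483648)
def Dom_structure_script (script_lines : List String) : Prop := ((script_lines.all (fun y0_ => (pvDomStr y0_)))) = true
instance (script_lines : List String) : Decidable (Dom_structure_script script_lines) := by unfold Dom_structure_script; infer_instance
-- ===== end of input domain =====

-- B replaces A's three-variable accumulator loop by a two-phase block decomposition
-- (skip prologue, then span to the next header and emit each block at once); objective: alternative.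

-- Shared helpers (both Pythons evaluate exactly these tests).
-- Python str.isupper(): at least one cased character and no lowercase one;
-- on the ASCII domain 'cased' = isalpha, so this is exact on Dom_structure_script.
def pyIsUpper (s : String) : Bool :=
  (s.toList.any PySem.Chars.isalpha) && !(s.toList.any PySem.Chars.islower)

-- line.isupper() and 1 <= len(line.split()) <= 4
def isHeader (line : String) : Bool :=
  pyIsUpper line && decide (1 ≤ (PySem.Str.split₀ line).length ∧ (PySem.Str.split₀ line).length ≤ 4)

-- line.strip().startswith("(") and line.strip().endswith(")")
def isParen (line : String) : Bool :=
  PySem.Str.startswith (PySem.Str.strip line) "(" && PySem.Str.endswith (PySem.Str.strip line) ")"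

-- {"character": c, "line": ' '.join(addl).strip()}
def flushOne (c : String) (addl : List String) : List (String × String) :=
  [("character", c), ("line", PySem.Str.strip (PySem.Str.join " " addl))]

-- ===== PORT A =====
-- Python truthiness of current_character (None or "" falsy)
def ccTruthy : Option String → Bool
  | none => false
  | some c => !(c == "")

-- A's for-loop, step for step, over the state (structured, current_character, additional_lines);
-- the [] case is the final 'catch the last line' flush.
def loopA : List String → List (List (String × String)) → Option String → List String →
    List (List (String × String))
  | [], structured, cc, addl =>
      if ccTruthy cc && !addl.isEmpty then structured ++ [flushOne (cc.getD "") addl] else structured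
  | line :: rest, structured, cc, addl =>
      if isHeader line then
        if ccTruthy cc && !addl.isEmpty then
          loopA rest (structured ++ [flushOne (cc.getD "") addl]) (some line) []
        else
          loopA rest structured (some line) addl
      else if ccTruthy cc then
        if isParen line then loopA rest structured cc addl
        else loopA rest structured cc (addl ++ [line])
      else loopA rest structured cc addl

def structure_script (script_lines : List String) : List (List (String × String)) :=
  loopA script_lines [] none []

-- ===== PORT B =====
-- body = [l for l in segment if not is_paren(l)]
def filtBody (seg : List String) : List String := seg.filter (fun l => !isParen l)

-- if body: out.append({...})
def emitBlock (ch : String) (body : List String) : List (List (String × String)) :=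
  if body.isEmpty then [] else [flushOne ch body]

-- B's inner while loops: 'scan j forward to the next header, slice i+1..j' is exactly
-- takeWhile/dropWhile of the non-header prefix after the current header.
def loopB : List String → List (List (String × String))
  | [] => []
  | ch :: rest =>
      emitBlock ch (filtBody (rest.takeWhile (fun l => !isHeader l)))
        ++ loopB (rest.dropWhile (fun l => !isHeader l))
  termination_by ls => ls.length
  decreasing_by
    simp only [List.length_cons]
    exact Nat.lt_succ_of_le (List.length_dropWhile_le _ rest)

-- B's first while loop skips the prologue before the first header.
def structure_script_alt (script_lines : List String) : List (List (String × String)) :=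
  loopB (script_lines.dropWhile (fun l => !isHeader l))

-- ===== PRECONDITION & SPEC =====
def Spec_structure_script (script_lines : List String) (out : List (List (String × String))) : Prop := out = structure_script_alt script_lines
instance (script_lines : List String) (out : List (List (String × String))) : Decidable (Spec_structure_script script_lines out) := by unfold Spec_structure_script; infer_instance

-- ===== CLAIM (what is proved, stated in full; the proofs are below) =====
def Claim_equal_structure_script : Prop := ∀ (script_lines : List String), Dom_structure_script script_lines → Spec_structure_script script_lines (structure_script script_lines)

-- ===== LEMMAS AND PROOFS =====

-- a header line is nonempty (isupper needs a cased character), hence truthy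
theorem header_truthy (ch : String) (h : isHeader ch = true) : ccTruthy (some ch) = true := by
  simp only [ccTruthy, Bool.not_eq_eq_eq_not, Bool.not_true, beq_eq_false_iff_ne, ne_eq]
  intro he
  subst he
  simp [isHeader, pyIsUpper] at h

theorem loopB_cons (ch : String) (rest : List String) :
    loopB (ch :: rest) =
      emitBlock ch (filtBody (rest.takeWhile (fun l => !isHeader l)))
        ++ loopB (rest.dropWhile (fun l => !isHeader l)) := by
  rw [loopB]

-- main invariant: with an active header ch and buffer addl, A's loop appends the current
-- block (buffer ++ filtered non-header prefix) and then behaves like B on the rest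
theorem loopA_some (lines : List String) : ∀ (s : List (List (String × String)))
    (ch : String) (addl : List String), isHeader ch = true →
    loopA lines s (some ch) addl =
      s ++ emitBlock ch (addl ++ filtBody (lines.takeWhile (fun l => !isHeader l)))
        ++ loopB (lines.dropWhile (fun l => !isHeader l)) := by
  induction lines with
  | nil =>
      intro s ch addl hch
      simp only [loopA, List.takeWhile_nil, List.dropWhile_nil, filtBody, List.filter_nil,
        List.append_nil, loopB, header_truthy ch hch, Bool.true_and, emitBlock]
      cases addl <;> simp
  | cons line rest ih =>
      intro s ch addl hch
      by_cases hh : isHeader line = true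
      · simp only [loopA, hh, if_pos, header_truthy ch hch, Bool.true_and,
          List.takeWhile_cons, List.dropWhile_cons, Bool.not_eq_eq_eq_not, Bool.not_true]
        rw [if_neg Bool.false_ne_true, if_neg Bool.false_ne_true, loopB_cons]
        cases addl with
        | nil =>
            rw [if_neg (by simp), ih s line [] hh]
            simp [emitBlock, filtBody]
        | cons a as =>
            rw [if_pos (by simp), ih (s ++ [flushOne ((some ch).getD "") (a :: as)]) line [] hh]
            simp [emitBlock, filtBody, flushOne]
      · have hb : isHeader line = false := by simpa using hh
        simp only [loopA, hb, Bool.false_eq_true, if_false, header_truthy ch hch, if_pos,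
          List.takeWhile_cons, List.dropWhile_cons, Bool.not_eq_eq_eq_not, Bool.not_true]
        by_cases hp : isParen line = true
        · rw [if_pos hp, ih s ch addl hch]
          simp [filtBody, hp]
        · have hp' : isParen line = false := by simpa using hp
          rw [hp', if_neg (by simp), ih s ch (addl ++ [line]) hch]
          simp [filtBody, hp']

-- before the first header A only scans; the buffer stays empty
theorem loopA_none (lines : List String) : ∀ (s : List (List (String × String))),
    loopA lines s none [] = s ++ loopB (lines.dropWhile (fun l => !isHeader l)) := by
  induction lines with
  | nil => intro s; simp [loopA, loopB]
  | cons line rest ih =>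
      intro s
      by_cases hh : isHeader line = true
      · simp only [loopA, hh, if_pos, ccTruthy, Bool.false_and, Bool.false_eq_true, if_false,
          List.dropWhile_cons]
        rw [if_neg (by simp), loopA_some rest s line [] hh, loopB_cons]
        simp
      · have hb : isHeader line = false := by simpa using hh
        simp only [loopA, hb, Bool.false_eq_true, if_false, ccTruthy, List.dropWhile_cons]
        rw [if_pos (by simp)]
        simpa using ih s

-- ===== VERDICT (by name: the statement is the Claim_ definition above) =====
theorem structure_script_spec : Claim_equal_structure_script := by
  intro script_lines _
  unfold Spec_structure_script structure_script structure_script_alt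
  simpa using loopA_none script_lines []
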